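-- pv_equiv track=rewrite | github.com/dasld/morla | morla/utils.py | are_subdicts_invalid
-- ===== SOURCE A (Python) =====
-- from typing import (
--     Any,
--     Callable,
--     Dict,
--     Generator,
--     Hashable,
--     List,
--     Optional,
--     Set,
--     Sequence,
--     Tuple,
-- )
--
-- def dict_diff(d1: dict, d2: dict, lazy: Optional[bool] = True) -> Set[Hashable]:
--     """If lazy: return a singleton set with a key that occurs in exactly one of the two
--     dictionaries.
--     If not lazy: returns the set of all keys that occur in exactly one of the two
--     dictionaries.
--     """
--     d1_keys, d2_keys = set(d1.keys()), set(d2.keys())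
--     # if not lazy:
--     # XOR: a ^ b returns a new set with elements in either a or b but not both
--     #    return d1_keys ^ d2_keys
--     the_difference = set()
--     pair = (d1_keys, d2_keys)
--     for this, that in (pair, reversed(pair)):
--         for k in this:
--             if k not in that:
--                 the_difference.add(k)
--                 if lazy:
--                     # a break statement would exit just the inner for-loop
--                     return the_difference
--     return the_difference
--
-- def dicts_diffs(L: Sequence[dict], lazy: Optional[bool] = True) -> List[Tuple[dict]]:
--     if len(L) < 2:
--         return []
--     all_differences = []
--     # the last dict doesn't need to be checked, for it will have already been checked
--     # by then
--     for i, d1 in enumerate(L[:-1]):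
--         # i + 1 can't raise an IndexError here because i will never be the last index
--         after = L[i + 1 :]
--         for d2 in after:
--             diff = dict_diff(d1, d2)
--             if diff:
--                 all_differences.append((d1, d2))
--                 if lazy:
--                     # a break statement would exit just the inner for-loop
--                     return all_differences
--     return all_differences
--
-- def are_subdicts_invalid(D: Dict[Hashable, Dict], lazy: Optional[bool] = True) -> bool:
--     dictionaries = tuple(D.values())
--     return bool(dicts_diffs(dictionaries, lazy=lazy))
--     if False:
--         last = None
--         all_differences = []
--         for key, sub_d in D.items():
--             if last is None:
--                 last = sub_d
--                 continue
--             diff = dict_diff(last, sub_d)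
--             if not diff:
--                 continue
--             if lazy:
--                 return (key, diff)
--                 # diff_str = COMMA.join(sorted(diff))
--                 # msg = truncate(f"Key mismatch in {key}: {diff_str}")
--                 # raise ValueError(msg)
--             else:
--                 all_differences.append()
--         return all_differences
-- ===== SOURCE B (Python) =====
-- def are_subdicts_invalid(D, lazy=True):
--     it = iter(D.values())
--     first = next(it, None)
--     if first is None:
--         return False
--     base = first.keys()
--     return any(sub.keys() != base for sub in it)
-- ===== Notes on version B (the rewrite author's own statement) =====
-- stated objective: faster
-- what changed: Instead of comparing every pair of subdicts via dict_diff's quadruple loop, B compares each subdict's key view to the first subdict's key view in one pass (key-set equality is an equivalence relation, so all-pairs-equal iff all-equal-to-first).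
import Mathlib
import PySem

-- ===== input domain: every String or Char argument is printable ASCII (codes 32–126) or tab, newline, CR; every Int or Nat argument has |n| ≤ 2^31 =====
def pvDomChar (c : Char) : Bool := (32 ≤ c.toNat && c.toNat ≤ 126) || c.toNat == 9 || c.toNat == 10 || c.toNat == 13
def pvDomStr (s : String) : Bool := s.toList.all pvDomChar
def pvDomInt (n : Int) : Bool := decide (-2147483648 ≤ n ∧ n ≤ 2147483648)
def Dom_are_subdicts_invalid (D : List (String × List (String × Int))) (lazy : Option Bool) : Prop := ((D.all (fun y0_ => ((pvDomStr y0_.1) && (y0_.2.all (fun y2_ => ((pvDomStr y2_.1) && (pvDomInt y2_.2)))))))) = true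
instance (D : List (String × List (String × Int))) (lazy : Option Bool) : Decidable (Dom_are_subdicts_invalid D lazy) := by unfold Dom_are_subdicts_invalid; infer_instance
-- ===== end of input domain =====

-- B replaces A's all-pairs dict_diff scan (O(n^2*k)) by one pass comparing each subdict's
-- key set to the first subdict's key set (O(n*k)); measured faster, asymptotic change.

-- ===== PORT A =====
-- set(d.keys()) for a subdict given as an association list
def pvKeySet (d : List (String × Int)) : PySem.Set String :=
  PySem.Set.ofList (PySem.Dict.ofList d).keys

-- inner 'for k in this: if k not in that: the_difference.add(k); if lazy: return' of dict_diff;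
-- second component = 'returned early'
def pvDdScan (that : PySem.Set String) (lazy : Bool) (acc : PySem.Set String) :
    List String → PySem.Set String × Bool
  | [] => (acc, false)
  | k :: ks =>
    if that.contains k then pvDdScan that lazy acc ks
    else
      let acc' := PySem.Set.add acc k
      if lazy then (acc', true) else pvDdScan that lazy acc' ks

-- dict_diff(d1, d2, lazy): the two passes over (d1_keys, d2_keys) and its reverse
def pvDictDiff (d1 d2 : List (String × Int)) (lazy : Bool) : PySem.Set String :=
  let d1k := pvKeySet d1
  let d2k := pvKeySet d2
  let r1 := pvDdScan d2k lazy PySem.Set.empty d1k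
  if r1.2 then r1.1 else (pvDdScan d1k lazy r1.1 d2k).1

-- inner 'for d2 in after:' of dicts_diffs; second component = 'returned early'
def pvDdsInner (d1 : List (String × Int)) (lazy : Bool)
    (acc : List ((List (String × Int)) × (List (String × Int)))) :
    List (List (String × Int)) → (List ((List (String × Int)) × (List (String × Int)))) × Bool
  | [] => (acc, false)
  | d2 :: rest =>
    let diff := pvDictDiff d1 d2 true   -- dict_diff(d1, d2): lazy defaults to True
    if diff ≠ [] then                   -- 'if diff:' — set truthiness
      let acc' := acc ++ [(d1, d2)]
      if lazy then (acc', true) else pvDdsInner d1 lazy acc' rest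
    else pvDdsInner d1 lazy acc rest

-- outer 'for i, d1 in enumerate(L[:-1]): after = L[i+1:]' of dicts_diffs: at step i the pair
-- (d1, after) is exactly (head, tail) of the current suffix, so the loop is this suffix recursion
def pvDdsOuter (lazy : Bool)
    (acc : List ((List (String × Int)) × (List (String × Int)))) :
    List (List (String × Int)) → List ((List (String × Int)) × (List (String × Int)))
  | [] => acc
  | d1 :: rest =>
    let r := pvDdsInner d1 lazy acc rest
    if r.2 then r.1 else pvDdsOuter lazy r.1 rest

def pvDictsDiffs (L : List (List (String × Int))) (lazy : Bool) :
    List ((List (String × Int)) × (List (String × Int))) :=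
  if L.length < 2 then [] else pvDdsOuter lazy [] L

def are_subdicts_invalid (D : List (String × List (String × Int))) (lazy : Option Bool) : Bool :=
  let dictionaries := (PySem.Dict.ofList D).values
  let lazyT := match lazy with | none => false | some b => b   -- 'if lazy:' truthiness
  !(pvDictsDiffs dictionaries lazyT).isEmpty

-- ===== PORT B =====
def are_subdicts_invalid_alt (D : List (String × List (String × Int))) (lazy : Option Bool) : Bool :=
  match (PySem.Dict.ofList D).values with
  | [] => false
  | first :: rest =>
    let base := PySem.Set.ofList (PySem.Dict.ofList first).keys
    rest.any (fun sub => !(PySem.Set.equal (PySem.Set.ofList (PySem.Dict.ofList sub).keys) base))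

-- ===== PRECONDITION & SPEC =====
def Spec_are_subdicts_invalid (D : List (String × List (String × Int))) (lazy : Option Bool) (out : Bool) : Prop := out = are_subdicts_invalid_alt D lazy
instance (D : List (String × List (String × Int))) (lazy : Option Bool) (out : Bool) : Decidable (Spec_are_subdicts_invalid D lazy out) := by unfold Spec_are_subdicts_invalid; infer_instance

-- ===== CLAIM (what is proved, stated in full; the proofs are below) =====
def Claim_equal_are_subdicts_invalid : Prop := ∀ (D : List (String × List (String × Int))) (lazy : Option Bool), Dom_are_subdicts_invalid D lazy → Spec_are_subdicts_invalid D lazy (are_subdicts_invalid D lazy)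

-- ===== LEMMAS AND PROOFS =====

-- key-set equality of two subdicts, as a Prop
def pvKEq (d1 d2 : List (String × Int)) : Prop :=
  ∀ k, k ∈ pvKeySet d1 ↔ k ∈ pvKeySet d2

theorem pvAdd_ne_nil (acc : PySem.Set String) (k : String) : PySem.Set.add acc k ≠ [] := by
  rw [PySem.Set.add_eq_ite]
  split_ifs with hm
  · intro h; rw [h] at hm; simp at hm
  · simp

-- if every scanned key is in 'that', the lazy scan adds nothing and does not return early
theorem pvDdScan_good (that acc : PySem.Set String) (ks : List String)
    (h : ∀ k ∈ ks, that.contains k = true) :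
    pvDdScan that true acc ks = (acc, false) := by
  induction ks with
  | nil => rfl
  | cons k ks ih =>
    have hc : that.contains k = true := h k List.mem_cons_self
    simp only [pvDdScan, hc, if_true]
    exact ih (fun x hx => h x (List.mem_cons_of_mem _ hx))

-- if some scanned key is missing from 'that', the lazy scan returns early with a nonempty set
theorem pvDdScan_bad (that acc : PySem.Set String) (ks : List String)
    (h : ¬ ∀ k ∈ ks, that.contains k = true) :
    (pvDdScan that true acc ks).2 = true ∧ (pvDdScan that true acc ks).1 ≠ [] := by
  induction ks with
  | nil => exact absurd (by simp) h
  | cons k ks ih =>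
    by_cases hc : that.contains k = true
    · simp only [pvDdScan, hc, if_true]
      refine ih ?_
      intro hall
      apply h
      intro x hx
      rcases List.mem_cons.mp hx with rfl | hx'
      · exact hc
      · exact hall x hx'
    · simp only [pvDdScan, hc, if_false, if_true]
      exact ⟨rfl, pvAdd_ne_nil acc k⟩

-- dict_diff(d1, d2) is empty iff the two key sets coincide
theorem pvDictDiff_empty_iff (d1 d2 : List (String × Int)) :
    pvDictDiff d1 d2 true = [] ↔ pvKEq d1 d2 := by
  simp only [pvDictDiff, pvKEq]
  set k1 := pvKeySet d1 with hk1
  set k2 := pvKeySet d2 with hk2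
  by_cases hall1 : ∀ k ∈ (k1 : List String), k2.contains k = true
  · rw [pvDdScan_good k2 PySem.Set.empty k1 hall1]
    simp only [Bool.false_eq_true, if_false]
    by_cases hall2 : ∀ k ∈ (k2 : List String), k1.contains k = true
    · rw [pvDdScan_good k1 PySem.Set.empty k2 hall2]
      constructor
      · intro _ k
        exact ⟨fun hk => (PySem.Set.contains_iff _ _).mp (hall1 k hk),
               fun hk => (PySem.Set.contains_iff _ _).mp (hall2 k hk)⟩
      · intro _; rfl
    · obtain ⟨_, hne⟩ := pvDdScan_bad k1 PySem.Set.empty k2 hall2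
      constructor
      · intro habs; exact absurd habs hne
      · intro hiff
        exact (hall2 (fun k hk => (PySem.Set.contains_iff _ _).mpr ((hiff k).mpr hk))).elim
  · obtain ⟨hfl, hne⟩ := pvDdScan_bad k2 PySem.Set.empty k1 hall1
    rw [hfl]
    simp only [if_true]
    constructor
    · intro habs; exact absurd habs hne
    · intro hiff
      exact (hall1 (fun k hk => (PySem.Set.contains_iff _ _).mpr ((hiff k).mp hk))).elim

theorem pvKEq_symm {a b : List (String × Int)} (h : pvKEq a b) : pvKEq b a :=
  fun k => (h k).symm
theorem pvKEq_trans {a b c : List (String × Int)} (h1 : pvKEq a b) (h2 : pvKEq b c) :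
    pvKEq a c := fun k => (h1 k).trans (h2 k)

-- the inner loop of dicts_diffs produces [] iff acc was [] and nothing was appended
theorem pvDdsInner_empty_iff (d1 : List (String × Int)) (lazy : Bool)
    (acc : List ((List (String × Int)) × (List (String × Int))))
    (after : List (List (String × Int))) :
    (pvDdsInner d1 lazy acc after).1 = [] ↔ acc = [] ∧ ∀ d2 ∈ after, pvKEq d1 d2 := by
  induction after generalizing acc with
  | nil => simp [pvDdsInner]
  | cons d2 rest ih =>
    by_cases hd : pvDictDiff d1 d2 true = []
    · have hk : pvKEq d1 d2 := (pvDictDiff_empty_iff d1 d2).mp hd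
      simp only [pvDdsInner, hd, ne_eq, not_true_eq_false, if_false]
      rw [ih]
      constructor
      · rintro ⟨ha, h2⟩
        refine ⟨ha, ?_⟩
        intro x hx
        rcases List.mem_cons.mp hx with rfl | hx'
        · exact hk
        · exact h2 x hx'
      · rintro ⟨ha, h2⟩
        exact ⟨ha, fun x hx => h2 x (List.mem_cons_of_mem _ hx)⟩
    · have hk : ¬ pvKEq d1 d2 := fun h => hd ((pvDictDiff_empty_iff d1 d2).mpr h)
      simp only [pvDdsInner, hd, ne_eq, not_false_eq_true, if_true]
      constructor
      · intro h
        exfalso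
        split_ifs at h with hl
        · simp at h
        · have := (ih (acc ++ [(d1, d2)])).mp h
          simp at this
      · rintro ⟨_, h2⟩
        exact absurd (h2 d2 List.mem_cons_self) hk

theorem pvDdsInner_flag_true {d1 : List (String × Int)} {lazy : Bool}
    {acc : List ((List (String × Int)) × (List (String × Int)))}
    {after : List (List (String × Int))}
    (h : (pvDdsInner d1 lazy acc after).2 = true) :
    (pvDdsInner d1 lazy acc after).1 ≠ [] := by
  induction after generalizing acc with
  | nil => simp [pvDdsInner] at h
  | cons d2 rest ih =>
    by_cases hd : pvDictDiff d1 d2 true = []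
    · simp only [pvDdsInner, hd, ne_eq, not_true_eq_false, if_false] at h ⊢
      exact ih h
    · simp only [pvDdsInner, hd, ne_eq, not_false_eq_true, if_true] at h ⊢
      split_ifs at h ⊢ with hl
      · simp
      · intro hnil
        have := (pvDdsInner_empty_iff d1 lazy (acc ++ [(d1, d2)]) rest).mp hnil
        simp at this

-- the outer loop's result is [] iff acc was [] and every ordered pair has equal key sets
theorem pvDdsOuter_empty_iff (lazy : Bool)
    (L : List (List (String × Int))) :
    ∀ acc, pvDdsOuter lazy acc L = [] ↔ acc = [] ∧ L.Pairwise pvKEq := by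
  induction L with
  | nil => intro acc; simp [pvDdsOuter]
  | cons d1 rest ih =>
    intro acc
    simp only [pvDdsOuter]
    by_cases hfl : (pvDdsInner d1 lazy acc rest).2 = true
    · rw [if_pos hfl]
      constructor
      · intro h; exact absurd h (pvDdsInner_flag_true hfl)
      · rintro ⟨hacc, hpw⟩
        exfalso
        rw [List.pairwise_cons] at hpw
        have : (pvDdsInner d1 lazy acc rest).1 = [] :=
          (pvDdsInner_empty_iff d1 lazy acc rest).mpr ⟨hacc, hpw.1⟩
        exact pvDdsInner_flag_true hfl this
    · rw [if_neg hfl]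
      rw [ih, pvDdsInner_empty_iff, List.pairwise_cons]
      tauto

-- all-pairs key-set equality of a nonempty list reduces to equality with the head
theorem pvPairwise_iff_head (first : List (String × Int)) (rest : List (List (String × Int))) :
    (first :: rest).Pairwise pvKEq ↔ ∀ d ∈ rest, pvKEq first d := by
  rw [List.pairwise_cons]
  constructor
  · exact fun h => h.1
  · intro h
    refine ⟨h, List.pairwise_of_forall_mem_list ?_⟩
    intro a ha b hb
    exact pvKEq_trans (pvKEq_symm (h a ha)) (h b hb)

-- core: for a values-list of length ≥ 2, A's outer loop result is nonempty iff
-- some later subdict's key set differs from the first's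
theorem pvMain (lazyT : Bool) (first d2 : List (String × Int))
    (rest' : List (List (String × Int))) :
    (!(pvDdsOuter lazyT [] (first :: d2 :: rest')).isEmpty) =
      ((d2 :: rest').any fun sub =>
        !(PySem.Set.equal (PySem.Set.ofList (PySem.Dict.ofList sub).keys)
            (PySem.Set.ofList (PySem.Dict.ofList first).keys))) := by
  have hout := pvDdsOuter_empty_iff lazyT (first :: d2 :: rest') []
  by_cases hpw : (first :: d2 :: rest').Pairwise pvKEq
  · have heq : pvDdsOuter lazyT [] (first :: d2 :: rest') = [] := hout.mpr ⟨rfl, hpw⟩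
    have hB : ((d2 :: rest').any fun sub =>
        !(PySem.Set.equal (PySem.Set.ofList (PySem.Dict.ofList sub).keys)
            (PySem.Set.ofList (PySem.Dict.ofList first).keys))) = false := by
      apply List.any_eq_false.mpr
      intro d hd
      have hk : pvKEq first d := (pvPairwise_iff_head first (d2 :: rest')).mp hpw d hd
      intro hcon
      rw [Bool.not_eq_true'] at hcon
      have h2 := (PySem.Set.equal_iff (PySem.Set.ofList (PySem.Dict.ofList d).keys)
          (PySem.Set.ofList (PySem.Dict.ofList first).keys)).mpr (fun k => (hk k).symm)
      rw [hcon] at h2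
      exact Bool.false_ne_true h2
    rw [heq, hB]
    rfl
  · have hne : pvDdsOuter lazyT [] (first :: d2 :: rest') ≠ [] :=
      fun h => hpw (hout.mp h).2
    have hB : ((d2 :: rest').any fun sub =>
        !(PySem.Set.equal (PySem.Set.ofList (PySem.Dict.ofList sub).keys)
            (PySem.Set.ofList (PySem.Dict.ofList first).keys))) = true := by
      rw [pvPairwise_iff_head] at hpw
      rw [Classical.not_forall] at hpw
      obtain ⟨d, hd⟩ := hpw
      rw [Classical.not_imp] at hd
      obtain ⟨hdm, hnk⟩ := hd
      apply List.any_eq_true.mpr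
      refine ⟨d, hdm, ?_⟩
      rw [Bool.not_eq_true']
      cases hcon : PySem.Set.equal (PySem.Set.ofList (PySem.Dict.ofList d).keys)
          (PySem.Set.ofList (PySem.Dict.ofList first).keys)
      · rfl
      · exact (hnk (fun k => ((PySem.Set.equal_iff _ _).mp hcon k).symm)).elim
    rw [hB]
    cases hemp : (pvDdsOuter lazyT [] (first :: d2 :: rest')).isEmpty
    · rfl
    · exact absurd (List.isEmpty_iff.mp hemp) hne

-- ===== VERDICT (by name: the statement is the Claim_ definition above) =====
theorem are_subdicts_invalid_spec : Claim_equal_are_subdicts_invalid := by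
  intro D lazy _
  unfold Spec_are_subdicts_invalid
  unfold are_subdicts_invalid are_subdicts_invalid_alt pvDictsDiffs
  cases hv : (PySem.Dict.ofList D).values with
  | nil => simp
  | cons first rest =>
    cases rest with
    | nil => simp [pvDdsOuter, pvDdsInner]
    | cons d2 rest' =>
      cases lazy with
      | none => exact pvMain false first d2 rest'
      | some b => exact pvMain b first d2 rest'
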